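-- pv_equiv track=rewrite | github.com/nadah09/AoC2021 | day25/25.py | stepDir
-- ===== SOURCE A (Python) =====
-- def stepDir(inputs, d):
--     sym = ">" if d == (0, 1) else "v"
--     moved = {(i, j) for i in range(len(inputs)) for j in range(len(inputs[0]))
--         if inputs[i][j] == sym and inputs[(i+d[0])%len(inputs)][(j+d[1])%len(inputs[0])] == "."}
--     for i, j in moved:
--         inputs[i][j] = "."
--         inputs[(i+d[0])%len(inputs)][(j+d[1])%len(inputs[0])] = sym
--     return inputs, len(moved)
-- ===== SOURCE B (Python) =====
-- # Same-name re-implementation: one pure scan deciding each cell's new value from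
-- # its neighbours (no mover-set), then the rows are written back in place (mutates
-- # `inputs` like the original) and the movers are counted in the same scan's terms.
-- def stepDir(inputs, d):
--     sym = ">" if d == (0, 1) else "v"
--     n, m = len(inputs), (len(inputs[0]) if inputs else 0)
--     di, dj = d
--
--     def new_val(i, j):
--         c = inputs[i][j]
--         if c == "." and inputs[(i - di) % n][(j - dj) % m] == sym:
--             return sym
--         if c == sym and inputs[(i + di) % n][(j + dj) % m] == ".":
--             return "."
--         return c
--
--     new_rows = [[new_val(i, j) for j in range(m)] for i in range(n)]
--     count = sum(1 for i in range(n) for j in range(m)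
--                 if inputs[i][j] == sym and inputs[(i + di) % n][(j + dj) % m] == ".")
--     for i in range(n):
--         inputs[i][:m] = new_rows[i]
--     return inputs, count
-- ===== Notes on version B (the rewrite author's own statement) =====
-- stated objective: alternative
-- what changed: Instead of collecting a set of movers and then mutating the mover and target cells, B computes every cell's new value in one pure neighbour-lookup scan (cell gains sym if it is '.' and the cell behind is sym; loses it if it is sym and the cell ahead is '.'), counts movers in the same terms, and writes the rows back in place.
import Mathlib
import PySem

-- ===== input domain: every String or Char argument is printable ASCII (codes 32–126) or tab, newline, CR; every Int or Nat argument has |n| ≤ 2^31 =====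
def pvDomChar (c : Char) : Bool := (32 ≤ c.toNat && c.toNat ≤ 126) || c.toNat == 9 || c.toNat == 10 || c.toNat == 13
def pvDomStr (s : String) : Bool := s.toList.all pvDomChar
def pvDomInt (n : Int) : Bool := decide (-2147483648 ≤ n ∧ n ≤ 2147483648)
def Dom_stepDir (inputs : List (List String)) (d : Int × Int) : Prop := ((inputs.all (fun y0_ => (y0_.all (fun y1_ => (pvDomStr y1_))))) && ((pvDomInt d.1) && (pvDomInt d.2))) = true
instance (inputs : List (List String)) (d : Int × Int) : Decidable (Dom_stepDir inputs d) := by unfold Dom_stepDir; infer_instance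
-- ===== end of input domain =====

-- B replaces A's mover-set-then-mutate step with one pure neighbour-lookup scan per cell
-- plus an in-place row write-back (both Pythons mutate `inputs` in place and return it;
-- the equivalence proved here is about the returned value).


-- ===== PORT A =====
-- inputs[i][j] (exact for the in-range accesses Pre_ guarantees; "" default is never read there)
def pvCell (g : List (List String)) (i j : Int) : String :=
  PySem.List.pyGetD (PySem.List.pyGetD g i ([] : List String)) j ""

-- inputs[i][j] = v (exact for in-range i, j, which Pre_ guarantees here)
def pvSetCell (g : List (List String)) (i j : Int) (v : String) : List (List String) :=
  PySem.List.pySetD g i (PySem.List.pySetD (PySem.List.pyGetD g i ([] : List String)) j v)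

-- Port of A. Python iterates the set `moved` in hash order; the two writes per mover
-- commute (movers' sources and targets are pairwise compatible), so folding in
-- first-insertion order (PySem.Set.ofList) yields the same grid.
def stepDir (inputs : List (List String)) (d : Int × Int) : List (List String) × Int :=
  let sym : String := if d = (0, 1) then ">" else "v"
  let n : Int := PySem.List.len inputs
  let m : Int := PySem.List.len (PySem.List.pyGetD inputs 0 ([] : List String))
  let moved : List (Int × Int) := PySem.Set.ofList
    ((PySem.List.pyRange 0 n 1).flatMap (fun i =>
      (PySem.List.pyRange 0 m 1).filterMap (fun j =>
        if pvCell inputs i j = sym ∧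
           pvCell inputs (PySem.Int.mod (i + d.1) n) (PySem.Int.mod (j + d.2) m) = "." then
          some (i, j) else none)))
  let g := moved.foldl (fun g p =>
      pvSetCell (pvSetCell g p.1 p.2 ".")
        (PySem.Int.mod (p.1 + d.1) n) (PySem.Int.mod (p.2 + d.2) m) sym) inputs
  (g, PySem.List.len moved)

-- ===== PORT B =====
def stepDir_alt (inputs : List (List String)) (d : Int × Int) : List (List String) × Int :=
  let sym : String := if d = (0, 1) then ">" else "v"
  let n : Int := PySem.List.len inputs
  let m : Int := if inputs = ([] : List (List String)) then 0
    else PySem.List.len (PySem.List.pyGetD inputs 0 ([] : List String))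
  let newVal : Int → Int → String := fun i j =>
    let c := pvCell inputs i j
    if c = "." ∧ pvCell inputs (PySem.Int.mod (i - d.1) n) (PySem.Int.mod (j - d.2) m) = sym then
      sym
    else if c = sym ∧ pvCell inputs (PySem.Int.mod (i + d.1) n) (PySem.Int.mod (j + d.2) m) = "." then
      "."
    else c
  let newRows : List (List String) :=
    (PySem.List.pyRange 0 n 1).map (fun i => (PySem.List.pyRange 0 m 1).map (fun j => newVal i j))
  let count : Int :=
    PySem.List.len ((PySem.List.pyRange 0 n 1).flatMap (fun i =>
      (PySem.List.pyRange 0 m 1).filter (fun j =>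
        decide (pvCell inputs i j = sym ∧
          pvCell inputs (PySem.Int.mod (i + d.1) n) (PySem.Int.mod (j + d.2) m) = "."))))
  -- for i in range(n): inputs[i][:m] = new_rows[i]
  let g := (PySem.List.pyRange 0 n 1).foldl (fun g i =>
      PySem.List.pySetD g i
        (PySem.List.pyGetD newRows i ([] : List String) ++
          PySem.List.slice (PySem.List.pyGetD g i ([] : List String)) (some m) none)) inputs
  (g, count)

-- ===== PRECONDITION & SPEC =====
-- Pre_ excludes exactly the inputs on which A raises IndexError: some row shorter than
-- row 0 (then inputs[i][j] is evaluated for j < len(inputs[0]) and is out of range).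
def Pre_stepDir (inputs : List (List String)) (d : Int × Int) : Prop :=
  ∀ row ∈ inputs, (inputs.headD []).length ≤ row.length
instance (inputs : List (List String)) (d : Int × Int) : Decidable (Pre_stepDir inputs d) := by
  unfold Pre_stepDir; infer_instance

def pvWitness_stepDir : List (List String) × (Int × Int) := ([[">", "."], [".", "v"]], (0, 1))

def Spec_stepDir (inputs : List (List String)) (d : Int × Int) (out : List (List String) × Int) : Prop := out = stepDir_alt inputs d
instance (inputs : List (List String)) (d : Int × Int) (out : List (List String) × Int) : Decidable (Spec_stepDir inputs d out) := by unfold Spec_stepDir; infer_instance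

-- ===== CLAIM (what is proved, stated in full; the proofs are below) =====
def Claim_equal_stepDir : Prop := ∀ (inputs : List (List String)) (d : Int × Int), Dom_stepDir inputs d → Pre_stepDir inputs d → Spec_stepDir inputs d (stepDir inputs d)

-- ===== LEMMAS AND PROOFS =====

-- Nat-indexed cell read/write, and a "list of writes" view of A's mutation loop.
def cellN (g : List (List String)) (p : Nat × Nat) : String := (g.getD p.1 []).getD p.2 ""

def setN (g : List (List String)) (p : Nat × Nat) (v : String) : List (List String) :=
  g.set p.1 ((g.getD p.1 []).set p.2 v)

def applyW (W : List ((Nat × Nat) × String)) (g : List (List String)) : List (List String) :=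
  W.foldl (fun h w => setN h w.1 w.2) g

def gM (inputs : List (List String)) : Nat :=
  (PySem.List.pyGetD inputs 0 ([] : List String)).length

def symOf (d : Int × Int) : String := if d = (0, 1) then ">" else "v"

lemma symOf_def (d : Int × Int) : symOf d = if d = (0, 1) then ">" else "v" := rfl

def aheadN (inputs : List (List String)) (d : Int × Int) (p : Nat × Nat) : Nat × Nat :=
  ((PySem.Int.mod ((p.1 : Int) + d.1) (inputs.length : Int)).toNat,
   (PySem.Int.mod ((p.2 : Int) + d.2) ((gM inputs : Int))).toNat)

def behindN (inputs : List (List String)) (d : Int × Int) (p : Nat × Nat) : Nat × Nat :=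
  ((PySem.Int.mod ((p.1 : Int) - d.1) (inputs.length : Int)).toNat,
   (PySem.Int.mod ((p.2 : Int) - d.2) ((gM inputs : Int))).toNat)

abbrev MvN (inputs : List (List String)) (d : Int × Int) (p : Nat × Nat) : Prop :=
  p.1 < inputs.length ∧ p.2 < gM inputs ∧ cellN inputs p = symOf d ∧
    cellN inputs (aheadN inputs d p) = "."

def movedN (inputs : List (List String)) (d : Int × Int) : List (Nat × Nat) :=
  (List.range inputs.length).flatMap (fun i =>
    ((List.range (gM inputs)).filter (fun j => decide (MvN inputs d (i, j)))).map
      (fun j => ((i, j) : Nat × Nat)))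

def movedI (inputs : List (List String)) (d : Int × Int) : List (Int × Int) :=
  (movedN inputs d).map (fun q => ((q.1 : Int), (q.2 : Int)))

def writesW (inputs : List (List String)) (d : Int × Int) : List ((Nat × Nat) × String) :=
  (movedN inputs d).flatMap (fun q => [(q, "."), (aheadN inputs d q, symOf d)])

def newValN (inputs : List (List String)) (d : Int × Int) (p : Nat × Nat) : String :=
  if cellN inputs p = "." ∧ cellN inputs (behindN inputs d p) = symOf d then symOf d
  else if cellN inputs p = symOf d ∧ cellN inputs (aheadN inputs d p) = "." then "."
  else cellN inputs p

-- ---- generic list facts ----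

lemma flatMap_congr_mem {α β : Type} {l : List α} {f g : α → List β}
    (h : ∀ x ∈ l, f x = g x) : l.flatMap f = l.flatMap g := by
  induction l with
  | nil => rfl
  | cons a l ih =>
    simp only [List.flatMap_cons]
    rw [h a (List.mem_cons_self ..), ih (fun x hx => h x (List.mem_cons_of_mem _ hx))]

lemma filterMap_congr_mem {α β : Type} {l : List α} {f g : α → Option β}
    (h : ∀ x ∈ l, f x = g x) : l.filterMap f = l.filterMap g := by
  induction l with
  | nil => rfl
  | cons a l ih =>
    simp only [List.filterMap_cons]
    rw [h a (List.mem_cons_self ..), ih (fun x hx => h x (List.mem_cons_of_mem _ hx))]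

lemma filterMap_ite_eq_filter_map {α β : Type} (l : List α) (P : α → Prop) [DecidablePred P]
    (f : α → β) :
    l.filterMap (fun x => if P x then some (f x) else none)
      = (l.filter (fun x => decide (P x))).map f := by
  induction l with
  | nil => rfl
  | cons a l ih => by_cases h : P a <;> simp [h, ih]

lemma map_snd_filterMap_ite {α β : Type} (l : List α) (P : α → Prop) [DecidablePred P]
    (f : α → β) :
    (l.filterMap (fun x => if P x then some (f x, x) else none)).map Prod.snd
      = l.filter (fun x => decide (P x)) := by
  induction l with
  | nil => rfl
  | cons a l ih => by_cases h : P a <;> simp [h, ih]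

lemma mapIdx_congr_lt {α β : Type} {l : List α} {f g : Nat → α → β}
    (h : ∀ (k : Nat) (hk : k < l.length), f k l[k] = g k l[k]) :
    List.mapIdx f l = List.mapIdx g l := by
  apply List.ext_getElem (by simp)
  intro i h1 h2
  rw [List.getElem_mapIdx, List.getElem_mapIdx]
  exact h i (by simpa using h1)

lemma nodup_flatMap_pairs (f : Nat → List Nat) (hf : ∀ i, (f i).Nodup) :
    ∀ l : List Nat, l.Nodup →
      (l.flatMap (fun i => (f i).map (fun j => ((i, j) : Nat × Nat)))).Nodup := by
  intro l
  induction l with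
  | nil => intro _; simp
  | cons a l ih =>
    intro h
    rw [List.flatMap_cons]
    have hd := List.nodup_cons.mp h
    refine List.Nodup.append ?_ ?_ ?_
    · refine List.Nodup.map ?_ (hf a)
      intro x y hxy
      simpa using hxy
    · exact ih hd.2
    · intro x hx1 hx2
      obtain ⟨j, _, rfl⟩ := List.mem_map.mp hx1
      obtain ⟨i, hi, hx⟩ := List.mem_flatMap.mp hx2
      obtain ⟨j', _, hj'⟩ := List.mem_map.mp hx
      have hia : i = a := congrArg Prod.fst hj'
      exact hd.1 (hia ▸ hi)

-- ---- cell/set basics ----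

lemma getD_set_self {α : Type} (l : List α) (i : Nat) (v d : α) (h : i < l.length) :
    (l.set i v).getD i d = v := by
  rw [List.getD_eq_getElem?_getD, List.getElem?_set_self h]; rfl

lemma getD_set_ne {α : Type} (l : List α) (i j : Nat) (v d : α) (h : i ≠ j) :
    (l.set i v).getD j d = l.getD j d := by
  rw [List.getD_eq_getElem?_getD, List.getElem?_set_ne h, ← List.getD_eq_getElem?_getD]

lemma set_oob {α : Type} (l : List α) (i : Nat) (v : α) (h : ¬ i < l.length) :
    l.set i v = l := by
  apply List.ext_getElem (by simp)
  intro k h1 h2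
  have hik : i ≠ k := by simp at h1; omega
  have hh := List.getElem?_set_ne (a := v) (l := l) hik
  simp only [List.getElem?_eq_getElem h1, List.getElem?_eq_getElem h2] at hh
  exact Option.some_injective _ hh

lemma length_setN (g : List (List String)) (p : Nat × Nat) (v : String) :
    (setN g p v).length = g.length := by simp [setN]

lemma getD_setN_ne (g : List (List String)) (p : Nat × Nat) (v : String) (i : Nat)
    (h : i ≠ p.1) : (setN g p v).getD i [] = g.getD i [] :=
  getD_set_ne _ _ _ _ _ (Ne.symm h)

lemma getD_setN_self (g : List (List String)) (p : Nat × Nat) (v : String)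
    (h : p.1 < g.length) : (setN g p v).getD p.1 [] = (g.getD p.1 []).set p.2 v :=
  getD_set_self _ _ _ _ h

lemma rowlen_setN (g : List (List String)) (p : Nat × Nat) (v : String) (i : Nat) :
    ((setN g p v).getD i []).length = (g.getD i []).length := by
  by_cases h : i = p.1
  · by_cases hl : p.1 < g.length
    · rw [h, getD_setN_self g p v hl, List.length_set]
    · rw [setN, set_oob _ _ _ hl]
  · rw [getD_setN_ne g p v i h]

lemma cellN_setN_ne (g : List (List String)) (p q : Nat × Nat) (v : String) (h : q ≠ p) :
    cellN (setN g p v) q = cellN g q := by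
  by_cases h1 : q.1 = p.1
  · have h2 : q.2 ≠ p.2 := by
      intro h2; exact h (Prod.ext h1 h2)
    by_cases hl : p.1 < g.length
    · rw [cellN, h1, getD_setN_self g p v hl, getD_set_ne _ _ _ _ _ (Ne.symm h2), cellN, h1]
    · rw [cellN, setN, set_oob _ _ _ hl]; rfl
  · rw [cellN, getD_setN_ne g p v q.1 h1]; rfl

lemma cellN_setN_self (g : List (List String)) (p : Nat × Nat) (v : String)
    (h1 : p.1 < g.length) (h2 : p.2 < (g.getD p.1 []).length) :
    cellN (setN g p v) p = v := by
  rw [cellN, getD_setN_self g p v h1, getD_set_self _ _ _ _ h2]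

-- ---- applyW facts ----

lemma length_applyW (W : List ((Nat × Nat) × String)) (g : List (List String)) :
    (applyW W g).length = g.length := by
  induction W generalizing g with
  | nil => rfl
  | cons w W ih => rw [applyW, List.foldl_cons, ← applyW, ih, length_setN]

lemma rowlen_applyW (W : List ((Nat × Nat) × String)) (g : List (List String)) (i : Nat) :
    ((applyW W g).getD i []).length = (g.getD i []).length := by
  induction W generalizing g with
  | nil => rfl
  | cons w W ih => rw [applyW, List.foldl_cons, ← applyW, ih, rowlen_setN]

lemma cellN_applyW_not_written (W : List ((Nat × Nat) × String)) (g : List (List String))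
    (q : Nat × Nat) (h : ∀ w ∈ W, w.1 ≠ q) : cellN (applyW W g) q = cellN g q := by
  induction W generalizing g with
  | nil => rfl
  | cons w W ih =>
    rw [applyW, List.foldl_cons, ← applyW,
      ih _ (fun w' hw' => h w' (List.mem_cons_of_mem _ hw')),
      cellN_setN_ne _ _ _ _ (Ne.symm (h w (List.mem_cons_self ..)))]

lemma cellN_applyW_written (W : List ((Nat × Nat) × String))
    (hcons : ∀ w ∈ W, ∀ w' ∈ W, w.1 = w'.1 → w.2 = w'.2) :
    ∀ (g : List (List String)) (p : Nat × Nat) (v : String), (p, v) ∈ W →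
      p.1 < g.length → p.2 < (g.getD p.1 []).length →
      cellN (applyW W g) p = v := by
  induction W with
  | nil => intro g p v h; simp at h
  | cons w W ih =>
    intro g p v hmem h1 h2
    rw [applyW, List.foldl_cons, ← applyW]
    by_cases hre : ∃ v', (p, v') ∈ W
    · obtain ⟨v', hv'⟩ := hre
      have hvv : v' = v :=
        hcons (p, v') (List.mem_cons_of_mem _ hv') (p, v) hmem rfl
      rw [← hvv]
      exact ih (fun a ha b hb => hcons a (List.mem_cons_of_mem _ ha) b (List.mem_cons_of_mem _ hb))
        (setN g w.1 w.2) p v' hv'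
        (by rw [length_setN]; exact h1)
        (by rw [rowlen_setN]; exact h2)
    · have hw : w = (p, v) := by
        rcases List.mem_cons.mp hmem with h | h
        · exact h.symm
        · exact absurd ⟨v, h⟩ hre
      subst hw
      have hnw : ∀ w' ∈ W, w'.1 ≠ p := by
        intro w' hmem' heq
        exact hre ⟨w'.2, by
          rw [show ((p, w'.2) : (Nat × Nat) × String) = w' from Prod.ext heq.symm rfl]
          exact hmem'⟩
      rw [cellN_applyW_not_written W _ p hnw]
      exact cellN_setN_self g p v h1 h2

-- ---- modulo facts ----

lemma mod_toNat_lt (x : Int) (n : Nat) (hn : 0 < n) : (PySem.Int.mod x (n : Int)).toNat < n := by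
  have h0 : (0 : Int) < (n : Int) := by exact_mod_cast hn
  have ha := PySem.Int.mod_nonneg x h0
  have hb := PySem.Int.mod_lt x h0
  omega

lemma cast_mod_toNat (x : Int) (n : Nat) (hn : 0 < n) :
    (((PySem.Int.mod x (n : Int)).toNat : Int)) = PySem.Int.mod x (n : Int) := by
  have h0 : (0 : Int) < (n : Int) := by exact_mod_cast hn
  exact Int.toNat_of_nonneg (PySem.Int.mod_nonneg x h0)

lemma mod_cancel_sub_add (i n : Nat) (a : Int) (hi : i < n) :
    PySem.Int.mod (((PySem.Int.mod ((i : Int) - a) (n : Int)).toNat : Int) + a) (n : Int)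
      = (i : Int) := by
  have hn : 0 < n := by omega
  have h0 : (0 : Int) < (n : Int) := by exact_mod_cast hn
  rw [cast_mod_toNat _ _ hn, PySem.Int.mod_eq_emod_of_pos h0, PySem.Int.mod_eq_emod_of_pos h0,
    Int.emod_add_emod, Int.sub_add_cancel]
  exact Int.emod_eq_of_lt (by exact_mod_cast Nat.zero_le i) (by exact_mod_cast hi)

lemma mod_cancel_add_sub (i n : Nat) (a : Int) (hi : i < n) :
    PySem.Int.mod (((PySem.Int.mod ((i : Int) + a) (n : Int)).toNat : Int) - a) (n : Int)
      = (i : Int) := by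
  have hn : 0 < n := by omega
  have h0 : (0 : Int) < (n : Int) := by exact_mod_cast hn
  rw [cast_mod_toNat _ _ hn, PySem.Int.mod_eq_emod_of_pos h0, PySem.Int.mod_eq_emod_of_pos h0,
    Int.sub_emod, Int.emod_emod_of_dvd _ dvd_rfl, ← Int.sub_emod, Int.add_sub_cancel]
  exact Int.emod_eq_of_lt (by exact_mod_cast Nat.zero_le i) (by exact_mod_cast hi)

lemma ahead_behind (inputs : List (List String)) (d : Int × Int) (p : Nat × Nat)
    (h1 : p.1 < inputs.length) (h2 : p.2 < gM inputs) :
    aheadN inputs d (behindN inputs d p) = p := by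
  have e1 := mod_cancel_sub_add p.1 inputs.length d.1 h1
  have e2 := mod_cancel_sub_add p.2 (gM inputs) d.2 h2
  refine Prod.ext ?_ ?_
  · show (PySem.Int.mod (((PySem.Int.mod ((p.1 : Int) - d.1) (inputs.length : Int)).toNat : Int) + d.1)
      (inputs.length : Int)).toNat = p.1
    rw [e1, Int.toNat_natCast]
  · show (PySem.Int.mod (((PySem.Int.mod ((p.2 : Int) - d.2) ((gM inputs : Int))).toNat : Int) + d.2)
      ((gM inputs : Int))).toNat = p.2
    rw [e2, Int.toNat_natCast]

lemma behind_ahead (inputs : List (List String)) (d : Int × Int) (p : Nat × Nat)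
    (h1 : p.1 < inputs.length) (h2 : p.2 < gM inputs) :
    behindN inputs d (aheadN inputs d p) = p := by
  have e1 := mod_cancel_add_sub p.1 inputs.length d.1 h1
  have e2 := mod_cancel_add_sub p.2 (gM inputs) d.2 h2
  refine Prod.ext ?_ ?_
  · show (PySem.Int.mod (((PySem.Int.mod ((p.1 : Int) + d.1) (inputs.length : Int)).toNat : Int) - d.1)
      (inputs.length : Int)).toNat = p.1
    rw [e1, Int.toNat_natCast]
  · show (PySem.Int.mod (((PySem.Int.mod ((p.2 : Int) + d.2) ((gM inputs : Int))).toNat : Int) - d.2)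
      ((gM inputs : Int))).toNat = p.2
    rw [e2, Int.toNat_natCast]

-- ---- moved / writes characterisation ----

lemma sym_ne_dot (d : Int × Int) : symOf d ≠ "." := by
  unfold symOf; split <;> decide

lemma mem_movedN (inputs : List (List String)) (d : Int × Int) (p : Nat × Nat) :
    p ∈ movedN inputs d ↔ MvN inputs d p := by
  obtain ⟨p1, p2⟩ := p
  unfold movedN
  simp only [List.mem_flatMap, List.mem_map, List.mem_filter, List.mem_range,
    decide_eq_true_eq, Prod.mk.injEq]
  constructor
  · rintro ⟨i, hi, j, ⟨hj, hM⟩, rfl, rfl⟩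
    exact hM
  · intro h
    exact ⟨p1, h.1, p2, ⟨⟨h.2.1, h⟩, rfl, rfl⟩⟩

lemma mem_writesW (inputs : List (List String)) (d : Int × Int) (w : (Nat × Nat) × String) :
    w ∈ writesW inputs d ↔
      ∃ q, MvN inputs d q ∧ (w = (q, ".") ∨ w = (aheadN inputs d q, symOf d)) := by
  unfold writesW
  rw [List.mem_flatMap]
  constructor
  · rintro ⟨q, hq, hw⟩
    refine ⟨q, (mem_movedN inputs d q).mp hq, ?_⟩
    simpa using hw
  · rintro ⟨q, h1, h2⟩
    exact ⟨q, (mem_movedN inputs d q).mpr h1, by simpa using h2⟩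

lemma consW (inputs : List (List String)) (d : Int × Int) :
    ∀ w ∈ writesW inputs d, ∀ w' ∈ writesW inputs d, w.1 = w'.1 → w.2 = w'.2 := by
  intro w hw w' hw' heq
  rcases (mem_writesW inputs d w).mp hw with ⟨q, hq, hc⟩
  rcases (mem_writesW inputs d w').mp hw' with ⟨q', hq', hc'⟩
  rcases hc with rfl | rfl <;> rcases hc' with rfl | rfl
  · rfl
  · exfalso
    apply sym_ne_dot d
    have heq' : q = aheadN inputs d q' := heq
    rw [← hq.2.2.1, heq']
    exact hq'.2.2.2
  · exfalso
    apply sym_ne_dot d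
    have heq' : aheadN inputs d q = q' := heq
    rw [← hq'.2.2.1, ← heq']
    exact hq.2.2.2
  · rfl

lemma rowlen_ge (inputs : List (List String))
    (hrow : ∀ row ∈ inputs, gM inputs ≤ row.length) (i : Nat) (h : i < inputs.length) :
    gM inputs ≤ (inputs.getD i []).length := by
  rw [List.getD_eq_getElem _ _ h]
  exact hrow _ (List.getElem_mem h)

lemma writesW_bounds (inputs : List (List String)) (d : Int × Int) :
    ∀ w ∈ writesW inputs d, w.1.1 < inputs.length ∧ w.1.2 < gM inputs := by
  intro w hw
  rcases (mem_writesW inputs d w).mp hw with ⟨q, hq, rfl | rfl⟩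
  · exact ⟨hq.1, hq.2.1⟩
  · have h1 := hq.1
    have h2 := hq.2.1
    exact ⟨mod_toNat_lt _ _ (by omega), mod_toNat_lt _ _ (by omega)⟩

-- ---- the per-cell description of A's grid ----

lemma cell_final (inputs : List (List String)) (d : Int × Int)
    (hrow : ∀ row ∈ inputs, gM inputs ≤ row.length) (p : Nat × Nat)
    (hp1 : p.1 < inputs.length) :
    cellN (applyW (writesW inputs d) inputs) p
      = if p.2 < gM inputs then newValN inputs d p else cellN inputs p := by
  by_cases hpm : p.2 < gM inputs
  · rw [if_pos hpm]
    have hn : 0 < inputs.length := by omega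
    have hm : 0 < gM inputs := by omega
    by_cases h1 : cellN inputs p = "." ∧ cellN inputs (behindN inputs d p) = symOf d
    · have hMv : MvN inputs d (behindN inputs d p) := by
        refine ⟨mod_toNat_lt _ _ hn, mod_toNat_lt _ _ hm, h1.2, ?_⟩
        rw [ahead_behind inputs d p hp1 hpm]
        exact h1.1
      have hwmem : ((p, symOf d) : (Nat × Nat) × String) ∈ writesW inputs d :=
        (mem_writesW inputs d _).mpr
          ⟨behindN inputs d p, hMv, Or.inr (by rw [ahead_behind inputs d p hp1 hpm])⟩
      rw [cellN_applyW_written (writesW inputs d) (consW inputs d) inputs p (symOf d) hwmem hp1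
        (lt_of_lt_of_le hpm (rowlen_ge inputs hrow p.1 hp1))]
      rw [newValN, if_pos h1]
    · by_cases h2 : cellN inputs p = symOf d ∧ cellN inputs (aheadN inputs d p) = "."
      · have hwmem : ((p, ".") : (Nat × Nat) × String) ∈ writesW inputs d :=
          (mem_writesW inputs d _).mpr ⟨p, ⟨hp1, hpm, h2.1, h2.2⟩, Or.inl rfl⟩
        rw [cellN_applyW_written (writesW inputs d) (consW inputs d) inputs p "." hwmem hp1
          (lt_of_lt_of_le hpm (rowlen_ge inputs hrow p.1 hp1))]
        rw [newValN, if_neg h1, if_pos h2]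
      · have hnw : ∀ w ∈ writesW inputs d, w.1 ≠ p := by
          intro w hw heq
          rcases (mem_writesW inputs d w).mp hw with ⟨q, hq, rfl | rfl⟩
          · have heq' : q = p := heq
            subst heq'
            exact h2 ⟨hq.2.2.1, hq.2.2.2⟩
          · have heq' : aheadN inputs d q = p := heq
            have hqb : q = behindN inputs d p := by
              rw [← heq', behind_ahead inputs d q hq.1 hq.2.1]
            exact h1 ⟨by rw [← heq']; exact hq.2.2.2, by rw [← hqb]; exact hq.2.2.1⟩
        rw [cellN_applyW_not_written _ _ _ hnw, newValN, if_neg h1, if_neg h2]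
  · rw [if_neg hpm]
    have hnw : ∀ w ∈ writesW inputs d, w.1 ≠ p := by
      intro w hw heq
      have hb := (writesW_bounds inputs d w hw).2
      rw [heq] at hb
      omega
    exact cellN_applyW_not_written _ _ _ hnw

-- ---- bridging Int-level port expressions to the Nat level ----

lemma pvCell_natCast (g : List (List String)) (a b : Nat) :
    pvCell g (a : Int) (b : Int) = cellN g (a, b) := by
  simp [pvCell, cellN, PySem.List.pyGetD_natCast]

lemma pvSetCell_natCast (g : List (List String)) (a b : Nat) (v : String) :
    pvSetCell g (a : Int) (b : Int) v = setN g (a, b) v := by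
  simp [pvSetCell, setN, PySem.List.pySetD_natCast, PySem.List.pyGetD_natCast]

lemma condA_iff (inputs : List (List String)) (d : Int × Int) (i j : Nat)
    (hi : i < inputs.length) (hj : j < gM inputs) :
    (pvCell inputs (i : Int) (j : Int) = symOf d ∧
      pvCell inputs (PySem.Int.mod ((i : Int) + d.1) (inputs.length : Int))
        (PySem.Int.mod ((j : Int) + d.2) ((gM inputs : Int))) = ".")
      ↔ MvN inputs d (i, j) := by
  have hn : 0 < inputs.length := by omega
  have hm : 0 < gM inputs := by omega
  have hcell : pvCell inputs (PySem.Int.mod ((i : Int) + d.1) (inputs.length : Int))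
      (PySem.Int.mod ((j : Int) + d.2) ((gM inputs : Int)))
      = cellN inputs (aheadN inputs d (i, j)) := by
    rw [← cast_mod_toNat ((i : Int) + d.1) inputs.length hn,
      ← cast_mod_toNat ((j : Int) + d.2) (gM inputs) hm, pvCell_natCast]
    rfl
  rw [pvCell_natCast, hcell]
  constructor
  · intro h; exact ⟨hi, hj, h.1, h.2⟩
  · intro h; exact ⟨h.2.2.1, h.2.2.2⟩

lemma nodup_movedI (inputs : List (List String)) (d : Int × Int) :
    (movedI inputs d).Nodup := by
  apply List.Nodup.map
  · intro p q h
    simp only [Prod.ext_iff] at h ⊢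
    exact ⟨by exact_mod_cast h.1, by exact_mod_cast h.2⟩
  · exact nodup_flatMap_pairs _ (fun i => List.Nodup.filter _ List.nodup_range)
      _ List.nodup_range

lemma movedList_eq (inputs : List (List String)) (d : Int × Int) :
    ((PySem.List.pyRange 0 (inputs.length : Int) 1).flatMap (fun i =>
      (PySem.List.pyRange 0 ((gM inputs : Int)) 1).filterMap (fun j =>
        if pvCell inputs i j = symOf d ∧
            pvCell inputs (PySem.Int.mod (i + d.1) (inputs.length : Int))
              (PySem.Int.mod (j + d.2) ((gM inputs : Int))) = "." then
          some (i, j) else none)))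
      = movedI inputs d := by
  unfold movedI movedN
  rw [PySem.List.pyRange_zero_nat, PySem.List.pyRange_zero_nat,
    List.flatMap_map, List.map_flatMap]
  apply flatMap_congr_mem
  intro i hi
  have hi' : i < inputs.length := List.mem_range.mp hi
  rw [List.filterMap_map]
  rw [filterMap_congr_mem (g := fun j : Nat =>
    if MvN inputs d (i, j) then some (((i : Nat) : Int), ((j : Nat) : Int)) else none)
    (by
      intro j hj
      have hj' : j < gM inputs := List.mem_range.mp hj
      exact if_congr (condA_iff inputs d i j hi' hj') rfl rfl)]
  rw [filterMap_ite_eq_filter_map (List.range (gM inputs))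
    (fun j => MvN inputs d (i, j)) (fun j => (((i : Nat) : Int), ((j : Nat) : Int)))]
  rw [List.map_map]
  rfl

lemma foldl_pair_writes (l : List (Nat × Nat)) (h : Nat × Nat → Nat × Nat) (v1 v2 : String) :
    ∀ g : List (List String),
      l.foldl (fun g q => setN (setN g q v1) (h q) v2) g
        = applyW (l.flatMap (fun q => [(q, v1), (h q, v2)])) g := by
  induction l with
  | nil => intro g; rfl
  | cons q l ih =>
    intro g
    simp only [List.flatMap_cons, List.foldl_cons, applyW, List.cons_append, List.nil_append]
    exact ih _

-- ---- write-back loop of B = mapIdx ----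

lemma foldl_set_rows (F : Nat → List String → List String) :
    ∀ (t pre : List (List String)),
      (List.range' pre.length t.length).foldl
          (fun h k => h.set k (F k (h.getD k []))) (pre ++ t)
        = pre ++ List.mapIdx (fun k r => F (pre.length + k) r) t := by
  intro t
  induction t with
  | nil => intro pre; simp
  | cons r t ih =>
    intro pre
    simp only [List.length_cons]
    rw [List.range'_succ, List.foldl_cons]
    have hget : (pre ++ r :: t).getD pre.length [] = r := by
      simp [List.getD]
    have hset : (pre ++ r :: t).set pre.length (F pre.length r) = pre ++ F pre.length r :: t := by
      simp
    rw [hget, hset]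
    have key := ih (pre ++ [F pre.length r])
    have hlen : (pre ++ [F pre.length r]).length = pre.length + 1 := by simp
    rw [hlen] at key
    simp only [List.append_assoc, List.cons_append, List.nil_append] at key
    rw [key, List.mapIdx_cons]
    have hfun : (fun (k : Nat) (r' : List String) => F (pre.length + 1 + k) r')
        = (fun (k : Nat) (r' : List String) => F (pre.length + (k + 1)) r') := by
      funext k r'
      congr 1
      omega
    rw [hfun]
    simp

-- ---- normal form of port A ----

lemma L_A (inputs : List (List String)) (d : Int × Int) :
    stepDir inputs d = (applyW (writesW inputs d) inputs, ((movedN inputs d).length : Int)) := by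
  unfold stepDir
  show ((PySem.Set.ofList
      ((PySem.List.pyRange 0 (inputs.length : Int) 1).flatMap (fun i =>
        (PySem.List.pyRange 0 ((gM inputs : Int)) 1).filterMap (fun j =>
          if pvCell inputs i j = symOf d ∧
              pvCell inputs (PySem.Int.mod (i + d.1) (inputs.length : Int))
                (PySem.Int.mod (j + d.2) ((gM inputs : Int))) = "." then
            some (i, j) else none)))).foldl
      (fun g p =>
        pvSetCell (pvSetCell g p.1 p.2 ".")
          (PySem.Int.mod (p.1 + d.1) (inputs.length : Int))
          (PySem.Int.mod (p.2 + d.2) ((gM inputs : Int))) (symOf d)) inputs,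
    PySem.List.len (PySem.Set.ofList
      ((PySem.List.pyRange 0 (inputs.length : Int) 1).flatMap (fun i =>
        (PySem.List.pyRange 0 ((gM inputs : Int)) 1).filterMap (fun j =>
          if pvCell inputs i j = symOf d ∧
              pvCell inputs (PySem.Int.mod (i + d.1) (inputs.length : Int))
                (PySem.Int.mod (j + d.2) ((gM inputs : Int))) = "." then
            some (i, j) else none))))) = _
  rw [movedList_eq inputs d]
  rw [PySem.Set.ofList_eq_self_of_nodup _ (nodup_movedI inputs d)]
  refine Prod.ext ?_ ?_
  · show (movedI inputs d).foldl _ inputs = applyW (writesW inputs d) inputs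
    unfold movedI
    rw [List.foldl_map]
    rw [PySem.List.foldl_congr_mem (movedN inputs d) _
      (fun g q => setN (setN g q ".") (aheadN inputs d q) (symOf d)) inputs
      (by
        intro acc q hq
        have hMv := (mem_movedN inputs d q).mp hq
        have hm : 0 < gM inputs := by have := hMv.2.1; omega
        show pvSetCell (pvSetCell acc ((q.1 : Nat) : Int) ((q.2 : Nat) : Int) ".")
          (PySem.Int.mod ((q.1 : Int) + d.1) (inputs.length : Int))
          (PySem.Int.mod ((q.2 : Int) + d.2) ((gM inputs : Int))) (symOf d)
          = setN (setN acc q ".") (aheadN inputs d q) (symOf d)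
        rw [pvSetCell_natCast]
        rw [← cast_mod_toNat ((q.1 : Int) + d.1) inputs.length (by omega),
          ← cast_mod_toNat ((q.2 : Int) + d.2) (gM inputs) hm, pvSetCell_natCast]
        rfl)]
    exact foldl_pair_writes (movedN inputs d) (aheadN inputs d) "." (symOf d) inputs
  · show (PySem.List.len (movedI inputs d)) = ((movedN inputs d).length : Int)
    rw [PySem.List.len_eq]
    unfold movedI
    rw [List.length_map]

-- ---- normal form of port B ----

lemma newValI_eq (inputs : List (List String)) (d : Int × Int) (i j : Nat)
    (hi : i < inputs.length) (hj : j < gM inputs) :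
    (if pvCell inputs (i : Int) (j : Int) = "." ∧
        pvCell inputs (PySem.Int.mod ((i : Int) - d.1) (inputs.length : Int))
          (PySem.Int.mod ((j : Int) - d.2) ((gM inputs : Int))) = symOf d then symOf d
     else if pvCell inputs (i : Int) (j : Int) = symOf d ∧
        pvCell inputs (PySem.Int.mod ((i : Int) + d.1) (inputs.length : Int))
          (PySem.Int.mod ((j : Int) + d.2) ((gM inputs : Int))) = "." then "."
     else pvCell inputs (i : Int) (j : Int))
      = newValN inputs d (i, j) := by
  have hn : 0 < inputs.length := by omega
  have hm : 0 < gM inputs := by omega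
  have hb : pvCell inputs (PySem.Int.mod ((i : Int) - d.1) (inputs.length : Int))
      (PySem.Int.mod ((j : Int) - d.2) ((gM inputs : Int)))
      = cellN inputs (behindN inputs d (i, j)) := by
    rw [← cast_mod_toNat ((i : Int) - d.1) inputs.length hn,
      ← cast_mod_toNat ((j : Int) - d.2) (gM inputs) hm, pvCell_natCast]
    rfl
  have ha : pvCell inputs (PySem.Int.mod ((i : Int) + d.1) (inputs.length : Int))
      (PySem.Int.mod ((j : Int) + d.2) ((gM inputs : Int)))
      = cellN inputs (aheadN inputs d (i, j)) := by
    rw [← cast_mod_toNat ((i : Int) + d.1) inputs.length hn,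
      ← cast_mod_toNat ((j : Int) + d.2) (gM inputs) hm, pvCell_natCast]
    rfl
  simp only [pvCell_natCast, hb, ha, newValN]

lemma countList_eq (inputs : List (List String)) (d : Int × Int) :
    ((PySem.List.pyRange 0 (inputs.length : Int) 1).flatMap (fun i =>
      (PySem.List.pyRange 0 ((gM inputs : Int)) 1).filter (fun j =>
        decide (pvCell inputs i j = symOf d ∧
          pvCell inputs (PySem.Int.mod (i + d.1) (inputs.length : Int))
            (PySem.Int.mod (j + d.2) ((gM inputs : Int))) = "."))))
      = (movedI inputs d).map Prod.snd := by
  rw [← movedList_eq inputs d, List.map_flatMap]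
  apply flatMap_congr_mem
  intro i _
  exact (map_snd_filterMap_ite (PySem.List.pyRange 0 ((gM inputs : Int)) 1)
    (fun j => pvCell inputs i j = symOf d ∧
      pvCell inputs (PySem.Int.mod (i + d.1) (inputs.length : Int))
        (PySem.Int.mod (j + d.2) ((gM inputs : Int))) = ".") (fun _ => i)).symm

lemma L_B (inputs : List (List String)) (d : Int × Int) :
    stepDir_alt inputs d
      = (List.mapIdx (fun k r =>
            (List.range (gM inputs)).map (fun j => newValN inputs d (k, j))
              ++ r.drop (gM inputs)) inputs,
         ((movedN inputs d).length : Int)) := by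
  have hm' : (if inputs = ([] : List (List String)) then (0 : Int)
      else (((PySem.List.pyGetD inputs 0 ([] : List String)).length : Nat) : Int))
      = ((gM inputs : Int)) := by
    cases inputs <;> simp [gM, PySem.List.pyGetD_zero]
  unfold stepDir_alt
  simp only [PySem.List.len_eq, hm', ← symOf_def]
  refine Prod.ext ?_ ?_
  · show ((PySem.List.pyRange 0 (inputs.length : Int) 1).foldl _ inputs) = _
    rw [PySem.List.pyRange_zero_nat inputs.length, List.foldl_map]
    rw [← PySem.List.pyRange_zero_nat inputs.length]
    simp only [PySem.List.pySetD_natCast, PySem.List.slice_from_natCast,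
      PySem.List.pyGetD_natCast]
    rw [List.range_eq_range']
    have key := foldl_set_rows (fun (k : Nat) (r : List String) =>
      (((PySem.List.pyRange 0 (inputs.length : Int) 1).map (fun i =>
          (PySem.List.pyRange 0 ((gM inputs : Int)) 1).map (fun j =>
            if pvCell inputs i j = "." ∧
                pvCell inputs (PySem.Int.mod (i - d.1) (inputs.length : Int))
                  (PySem.Int.mod (j - d.2) ((gM inputs : Int))) = symOf d then symOf d
            else if pvCell inputs i j = symOf d ∧
                pvCell inputs (PySem.Int.mod (i + d.1) (inputs.length : Int))
                  (PySem.Int.mod (j + d.2) ((gM inputs : Int))) = "." then "."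
            else pvCell inputs i j))).getD k ([] : List String)) ++
        List.drop (gM inputs) r) inputs []
    simp only [List.length_nil, List.nil_append, Nat.zero_add] at key
    rw [key]
    apply mapIdx_congr_lt
    intro k hk
    have hrowsLen : ((PySem.List.pyRange 0 (inputs.length : Int) 1).map (fun i =>
        (PySem.List.pyRange 0 ((gM inputs : Int)) 1).map (fun j =>
          if pvCell inputs i j = "." ∧
              pvCell inputs (PySem.Int.mod (i - d.1) (inputs.length : Int))
                (PySem.Int.mod (j - d.2) ((gM inputs : Int))) = symOf d then symOf d
          else if pvCell inputs i j = symOf d ∧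
              pvCell inputs (PySem.Int.mod (i + d.1) (inputs.length : Int))
                (PySem.Int.mod (j + d.2) ((gM inputs : Int))) = "." then "."
          else pvCell inputs i j))).length = inputs.length := by
      simp [PySem.List.length_pyRange_one]
    have hrowk : (((PySem.List.pyRange 0 (inputs.length : Int) 1).map (fun i =>
        (PySem.List.pyRange 0 ((gM inputs : Int)) 1).map (fun j =>
          if pvCell inputs i j = "." ∧
              pvCell inputs (PySem.Int.mod (i - d.1) (inputs.length : Int))
                (PySem.Int.mod (j - d.2) ((gM inputs : Int))) = symOf d then symOf d
          else if pvCell inputs i j = symOf d ∧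
              pvCell inputs (PySem.Int.mod (i + d.1) (inputs.length : Int))
                (PySem.Int.mod (j + d.2) ((gM inputs : Int))) = "." then "."
          else pvCell inputs i j))).getD k ([] : List String))
        = (List.range (gM inputs)).map (fun j => newValN inputs d (k, j)) := by
      rw [List.getD_eq_getElem _ _ (by rw [hrowsLen]; exact hk), List.getElem_map,
        PySem.List.getElem_pyRange_one]
      simp only [zero_add]
      rw [show ((gM inputs : Int)) = (((gM inputs : Nat)) : Int) from rfl,
        PySem.List.pyRange_zero_nat (gM inputs), List.map_map]
      apply List.map_congr_left
      intro j hj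
      have hj' : j < gM inputs := List.mem_range.mp hj
      exact newValI_eq inputs d k j hk hj'
    rw [hrowk]
  · show PySem.List.len _ = ((movedN inputs d).length : Int)
    rw [countList_eq inputs d, PySem.List.len_eq, List.length_map]
    unfold movedI
    rw [List.length_map]


-- ===== VERDICT (by name: the statement is the Claim_ definition above) =====
theorem stepDir_spec : Claim_equal_stepDir := by
  intro inputs d _hdom hpre
  have hrowPre := hpre
  have hgm : gM inputs = (inputs.headD []).length := by
    cases inputs <;> simp [gM, PySem.List.pyGetD_zero]
  have hrow : ∀ row ∈ inputs, gM inputs ≤ row.length := by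
    intro row h
    rw [hgm]
    exact hrowPre row h
  unfold Spec_stepDir
  rw [L_A inputs d, L_B inputs d]
  refine Prod.ext ?_ rfl
  show applyW (writesW inputs d) inputs = _
  apply List.ext_getElem
  · rw [length_applyW, List.length_mapIdx]
  intro i h1 h2
  have hi : i < inputs.length := by rwa [length_applyW] at h1
  rw [List.getElem_mapIdx]
  have hrl : gM inputs ≤ inputs[i].length := hrow _ (List.getElem_mem hi)
  have hlenrow : (applyW (writesW inputs d) inputs)[i].length = inputs[i].length := by
    have hh := rowlen_applyW (writesW inputs d) inputs i
    rw [List.getD_eq_getElem _ _ h1, List.getD_eq_getElem _ _ hi] at hh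
    exact hh
  apply List.ext_getElem
  · rw [hlenrow]
    simp only [List.length_append, List.length_map, List.length_range, List.length_drop]
    omega
  intro j hj1 hj2
  have hjlen : j < inputs[i].length := by rwa [hlenrow] at hj1
  have hLHS : (applyW (writesW inputs d) inputs)[i][j]
      = cellN (applyW (writesW inputs d) inputs) (i, j) := by
    show (applyW (writesW inputs d) inputs)[i][j]
      = ((applyW (writesW inputs d) inputs).getD i []).getD j ""
    rw [List.getD_eq_getElem _ _ h1, List.getD_eq_getElem _ _ hj1]
  rw [hLHS, cell_final inputs d hrow (i, j) hi]
  show (if j < gM inputs then newValN inputs d (i, j) else cellN inputs (i, j)) = _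
  by_cases hjm : j < gM inputs
  · rw [if_pos hjm]
    rw [List.getElem_append_left (by simpa using hjm)]
    simp [List.getElem_map, List.getElem_range]
  · rw [if_neg hjm]
    rw [List.getElem_append_right (by simp only [List.length_map, List.length_range]; omega)]
    simp only [List.length_map, List.length_range]
    rw [List.getElem_drop]
    have hidx : gM inputs + (j - gM inputs) = j := by omega
    simp only [hidx]
    show ((inputs.getD i []).getD j "") = inputs[i][j]
    rw [List.getD_eq_getElem _ _ hi, List.getD_eq_getElem _ _ hjlen]
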